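-- pv_equiv track=rewrite | github.com/stone12222/stone12222.github.io | _a/CCC-mid/array_2d/a10_change_direction2.py | finalDir
-- ===== SOURCE A (Python) =====
-- def finalDir(dir,turns):
--     for turn in turns:
--         if turn=='R':
--             dir+=90
--         if turn=='L':
--             dir-=90
--         dir%=360
--         # if dir<0:
--         #     dir+=360
--         # if dir>=360:
--         #     dir-=360
--     return dir
-- ===== SOURCE B (Python) =====
-- def finalDir(dir, turns):
--     return (dir + 90 * (turns.count('R') - turns.count('L'))) % 360
-- ===== Notes on version B (the rewrite author's own statement) =====
-- stated objective: simpler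
-- what changed: replaces the per-turn update-and-mod loop by one closed-form expression from the counts of 'R' and 'L'
-- intended difference: On empty turn lists with dir outside [0,360) A returns dir un-normalized (e.g. 400) because its mod runs only inside the loop, while B returns dir % 360, the normalized direction A itself produces after every turn, which is the intended value. — e.g. on finalDir(400, []): A returns 400, B returns 40
import Mathlib
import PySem

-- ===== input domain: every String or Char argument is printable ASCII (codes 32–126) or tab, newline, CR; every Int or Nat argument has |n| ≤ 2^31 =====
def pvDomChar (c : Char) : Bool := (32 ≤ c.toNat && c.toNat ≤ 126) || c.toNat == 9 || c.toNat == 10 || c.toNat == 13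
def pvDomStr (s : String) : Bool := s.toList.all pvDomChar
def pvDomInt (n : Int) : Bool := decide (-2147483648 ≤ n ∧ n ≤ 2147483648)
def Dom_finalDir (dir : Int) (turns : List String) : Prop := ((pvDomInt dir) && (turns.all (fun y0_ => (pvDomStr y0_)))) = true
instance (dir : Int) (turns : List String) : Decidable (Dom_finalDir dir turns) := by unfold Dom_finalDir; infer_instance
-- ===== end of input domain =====

-- B replaces A's per-turn update-and-mod loop by one closed-form expression from the counts of 'R' and 'L' (objective: simpler).

-- ===== PORT A =====
def finalDir (dir : Int) (turns : List String) : Int :=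
  turns.foldl (fun d turn =>
    let d := if turn == "R" then d + 90 else d
    let d := if turn == "L" then d - 90 else d
    PySem.Int.mod d 360) dir

-- ===== PORT B =====
def finalDir_alt (dir : Int) (turns : List String) : Int :=
  PySem.Int.mod (dir + 90 * ((turns.count "R" : Int) - (turns.count "L" : Int))) 360

-- ===== PRECONDITION & SPEC =====
-- On empty turn lists with dir outside [0,360) A returns dir un-normalized because its mod runs
-- only inside the loop, while B returns dir % 360, the normalized direction A itself produces
-- after every turn, which is the intended value.
def D_finalDir (dir : Int) (turns : List String) : Prop :=
  turns = [] ∧ PySem.Int.mod dir 360 ≠ dir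
instance (dir : Int) (turns : List String) : Decidable (D_finalDir dir turns) := by
  unfold D_finalDir; infer_instance

def Spec_finalDir (dir : Int) (turns : List String) (out : Int) : Prop :=
  ¬ D_finalDir dir turns → out = finalDir_alt dir turns
instance (dir : Int) (turns : List String) (out : Int) : Decidable (Spec_finalDir dir turns out) := by
  unfold Spec_finalDir; infer_instance

def pvDiffWitness_finalDir : Int × List String := (400, [])
def pvDiffWitnessOut_finalDir : Int × Int := (400, 40)

-- ===== CLAIM (what is proved, stated in full; the proofs are below) =====
def Claim_unchanged_finalDir : Prop := ∀ (dir : Int) (turns : List String), Dom_finalDir dir turns → Spec_finalDir dir turns (finalDir dir turns)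
def Claim_changed_finalDir : Prop := Dom_finalDir (pvDiffWitness_finalDir.1) (pvDiffWitness_finalDir.2) ∧ D_finalDir (pvDiffWitness_finalDir.1) (pvDiffWitness_finalDir.2) ∧ finalDir (pvDiffWitness_finalDir.1) (pvDiffWitness_finalDir.2) = pvDiffWitnessOut_finalDir.1 ∧ finalDir_alt (pvDiffWitness_finalDir.1) (pvDiffWitness_finalDir.2) = pvDiffWitnessOut_finalDir.2 ∧ pvDiffWitnessOut_finalDir.1 ≠ pvDiffWitnessOut_finalDir.2
def Claim_exact_finalDir : Prop := ∀ (dir : Int) (turns : List String), Dom_finalDir dir turns → D_finalDir dir turns → finalDir dir turns ≠ finalDir_alt dir turns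

-- ===== LEMMAS AND PROOFS =====

theorem mod360 (a : Int) : PySem.Int.mod a 360 = a % 360 :=
  PySem.Int.mod_eq_emod_of_pos (by norm_num)

-- the turn delta: +90 for "R", -90 for "L", 0 otherwise
def turnDelta (t : String) : Int :=
  (if t == "R" then (90:Int) else 0) - (if t == "L" then (90:Int) else 0)

-- one step of A's loop, written out
theorem step_eq (d : Int) (t : String) :
    (let d' := if t == "R" then d + 90 else d
     let d'' := if t == "L" then d' - 90 else d'
     PySem.Int.mod d'' 360) = (d + turnDelta t) % 360 := by
  simp only [mod360, turnDelta]
  by_cases hR : t == "R" <;> by_cases hL : t == "L" <;> simp [hR, hL, sub_eq_add_neg]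

theorem delta_count (ts : List String) :
    90 * ((ts.count "R" : Int) - (ts.count "L" : Int)) = (ts.map turnDelta).sum := by
  induction ts with
  | nil => simp
  | cons t ts ih =>
    simp only [List.count_cons, List.map, List.sum_cons, turnDelta]
    by_cases hR : t == "R" <;> by_cases hL : t == "L" <;>
      · simp [hR, hL] at *
        omega

-- the loop from any start equals the closed form, for nonempty lists
theorem loop_closed : ∀ (ts : List String) (d : Int), ts ≠ [] →
    finalDir d ts = (d + (ts.map turnDelta).sum) % 360 := by
  intro ts
  induction ts with
  | nil => intro d h; exact absurd rfl h
  | cons t ts ih =>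
    intro d _
    have h1 : finalDir d (t :: ts) = finalDir ((d + turnDelta t) % 360) ts := by
      simp only [finalDir, List.foldl_cons]
      rw [step_eq]
    rcases eq_or_ne ts [] with h0 | h0
    · subst h0
      rw [h1]
      simp [finalDir]
    · rw [h1, ih _ h0, List.map_cons, List.sum_cons, Int.emod_add_emod]
      ring_nf

-- ===== VERDICT (by name: the statement is the Claim_ definition above) =====
theorem finalDir_spec : Claim_unchanged_finalDir := by
  intro d ts _ hD
  rcases eq_or_ne ts [] with h0 | h0
  · subst h0
    have hm : PySem.Int.mod d 360 = d := by
      by_contra h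
      exact hD ⟨rfl, h⟩
    have halt : finalDir_alt d [] = PySem.Int.mod d 360 := by simp [finalDir_alt]
    rw [halt, hm]
    rfl
  · rw [loop_closed ts d h0]
    simp [finalDir_alt, delta_count]

theorem finalDir_changed : Claim_changed_finalDir := by unfold Claim_changed_finalDir; decide

theorem finalDir_tight : Claim_exact_finalDir := by
  intro d ts _ hD
  obtain ⟨rfl, hne⟩ := hD
  have halt : finalDir_alt d [] = PySem.Int.mod d 360 := by simp [finalDir_alt]
  have ha : finalDir d [] = d := rfl
  rw [halt, ha]
  exact fun h => hne h.symm
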